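-- pv_equiv track=rewrite | github.com/Jacksonwoo95/MystanCodeProject | StanCodeProject/baby_names/babynames.py | search_names
-- ===== SOURCE A (Python) =====
-- def search_names(name_data, target):
--     """
--     Given a name_data dict that stores baby name information and a target string,
--     returns a list of all names in the dict that contain the target string. This
--     function should be case-insensitive with respect to the target string.
--
--     Input:
--         name_data (dict): a dict containing baby name data organized by name
--         target (str): a string to look for in the names contained within name_data
--
--     Returns:
--         matching_names (List[str]): a list of all names from name_data that contain
--                                     the target string
--     """
--     names = []
--     target_low = str(target).lower()
--     for name in name_data:
--         name_low = str(name).lower()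
--         # 取name片段文字
--         for i in range(len(name_low)-len(target_low)+1):
--             s = name_low[i:i+len(target_low)]
--             if s == target_low:
--                 names.append(name)
--
--     return names
-- ===== SOURCE B (Python) =====
-- def search_names(name_data, target):
--     target_low = str(target).lower()
--     names = []
--     for name in name_data:
--         name_low = str(name).lower()
--         pos = name_low.find(target_low)
--         while pos != -1:
--             names.append(name)
--             pos = name_low.find(target_low, pos + 1)
--     return names
-- ===== Notes on version B (the rewrite author's own statement) =====
-- stated objective: idiomatic
-- what changed: The inner range-over-positions loop with a manual slice-equality check is replaced by a while loop driven by str.find with an advancing start index, appending once per overlapping occurrence.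
import Mathlib
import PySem

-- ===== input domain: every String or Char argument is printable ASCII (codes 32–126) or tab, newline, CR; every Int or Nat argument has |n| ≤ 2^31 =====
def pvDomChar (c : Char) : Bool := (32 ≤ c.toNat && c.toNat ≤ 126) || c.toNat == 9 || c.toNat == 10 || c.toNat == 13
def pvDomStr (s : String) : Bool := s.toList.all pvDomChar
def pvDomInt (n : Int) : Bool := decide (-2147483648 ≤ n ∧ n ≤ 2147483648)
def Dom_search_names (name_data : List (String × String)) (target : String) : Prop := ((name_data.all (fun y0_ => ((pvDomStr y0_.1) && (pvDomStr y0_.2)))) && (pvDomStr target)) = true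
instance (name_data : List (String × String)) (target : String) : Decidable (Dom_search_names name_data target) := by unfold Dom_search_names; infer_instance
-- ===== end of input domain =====

-- B replaces A's inner range-over-positions loop with an idiomatic str.find-driven while loop
-- (advance the start index past each hit); same return value, including overlapping occurrences.

-- ===== PORT A =====
def search_names (name_data : List (String × String)) (target : String) : List String :=
  let target_low := PySem.Str.lower target
  name_data.foldl (fun names p =>
    let name_low := PySem.Str.lower p.1
    (PySem.List.pyRange 0 (PySem.Str.len name_low - PySem.Str.len target_low + 1) 1).foldl
      (fun ns i =>
        let s := PySem.Str.slice name_low (some i) (some (i + PySem.Str.len target_low))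
        if s = target_low then ns ++ [p.1] else ns)
      names) []

-- ===== PORT B =====
-- the while loop of Source B; the fuel argument only makes it structurally recursive
-- (name_low.toList.length + 2 iterations always suffice, proved below)
def pvFindLoop (name name_low target_low : String) (pos : Int) (acc : List String) : Nat → List String
  | 0 => acc
  | fuel + 1 =>
    if pos = -1 then acc
    else pvFindLoop name name_low target_low
      (PySem.Str.findFrom name_low target_low (pos + 1) none) (acc ++ [name]) fuel

def search_names_alt (name_data : List (String × String)) (target : String) : List String :=
  let target_low := PySem.Str.lower target
  name_data.foldl (fun names p =>
    let name_low := PySem.Str.lower p.1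
    pvFindLoop p.1 name_low target_low (PySem.Str.find name_low target_low) names
      (name_low.toList.length + 2)) []

-- ===== PRECONDITION & SPEC =====
def Spec_search_names (name_data : List (String × String)) (target : String) (out : List String) : Prop := out = search_names_alt name_data target
instance (name_data : List (String × String)) (target : String) (out : List String) : Decidable (Spec_search_names name_data target out) := by unfold Spec_search_names; infer_instance

-- ===== CLAIM (what is proved, stated in full; the proofs are below) =====
def Claim_equal_search_names : Prop := ∀ (name_data : List (String × String)) (target : String), Dom_search_names name_data target → Spec_search_names name_data target (search_names name_data target)

-- ===== LEMMAS AND PROOFS =====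

-- number of occurrence positions j ∈ [k, L.length] of T in L (prefix of L.drop j)
def pvCnt (L T : List Char) (k : Nat) : Nat :=
  ((List.range' k (L.length + 1 - k)).filter (fun j => decide (T <+: L.drop j))).length

theorem pvFindFrom_past (L T : List Char) (st : Int) (h : (L.length : Int) < st) :
    PySem.Chars.findFrom L T st none = -1 := by
  simp only [PySem.Chars.findFrom]
  have h0 : (0:Int) ≤ (L.length : Int) := by positivity
  split_ifs with h1 h2 h3 h4 <;> omega

theorem pvDrop_drop_sub (L : List Char) (k j : Nat) (hk : k ≤ j) :
    (L.drop k).drop (j - k) = L.drop j := by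
  rw [List.drop_drop]; congr 1; omega

theorem pvCnt_zero (L T : List Char) (k : Nat)
    (h : ∀ j, k ≤ j → ¬ T <+: L.drop j) : pvCnt L T k = 0 := by
  unfold pvCnt
  rw [List.filter_eq_nil_iff.2]
  · rfl
  · intro j hj
    have : k ≤ j := (List.mem_range'_1.1 hj).1
    simpa using h j this

theorem pvCnt_succ (L T : List Char) (k p : Nat) (hk : k ≤ p) (hp : p ≤ L.length)
    (hT : T <+: L.drop p) (hmin : ∀ i, k ≤ i → i < p → ¬ T <+: L.drop i) :
    pvCnt L T k = pvCnt L T (p + 1) + 1 := by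
  unfold pvCnt
  have hsplit : List.range' k (L.length + 1 - k) =
      List.range' k (p - k) ++ p :: List.range' (p + 1) (L.length - p) := by
    have h1 : List.range' k (p - k) ++ List.range' (k + 1 * (p - k)) (L.length + 1 - p) =
        List.range' k ((p - k) + (L.length + 1 - p)) := List.range'_append
    have h2 : k + 1 * (p - k) = p := by omega
    have h3 : (p - k) + (L.length + 1 - p) = L.length + 1 - k := by omega
    have h4 : List.range' p (L.length + 1 - p) = p :: List.range' (p + 1) (L.length - p) := by
      have : L.length + 1 - p = (L.length - p) + 1 := by omega
      rw [this, List.range'_succ]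
    rw [h2, h3, h4] at h1
    exact h1.symm
  rw [hsplit, List.filter_append]
  have hnil : (List.range' k (p - k)).filter (fun j => decide (T <+: L.drop j)) = [] := by
    rw [List.filter_eq_nil_iff.2]
    intro j hj
    have hm := List.mem_range'_1.1 hj
    simpa using hmin j hm.1 (by omega)
  rw [hnil]
  simp [hT]

theorem pvNoOcc_of_not_infix (L T : List Char) (k : Nat)
    (h : ¬ T <:+: L.drop k) : ∀ j, k ≤ j → ¬ T <+: L.drop j := by
  intro j hj hpre
  apply h
  rw [← PySem.Chars.isIn_iff_infix, ← PySem.Chars.exists_prefix_drop_iff_isIn]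
  exact ⟨j - k, by rwa [pvDrop_drop_sub L k j hj]⟩

theorem pvLoop_eq (name low t : String) :
    ∀ (fuel k : Nat) (acc : List String), k ≤ low.toList.length + 1 →
      low.toList.length + 2 - k ≤ fuel →
      pvFindLoop name low t (PySem.Chars.findFrom low.toList t.toList (k : Int) none) acc fuel
        = acc ++ List.replicate (pvCnt low.toList t.toList k) name := by
  intro fuel
  induction fuel with
  | zero => intro k acc hk hf; omega
  | succ fuel ih =>
    intro k acc hk hf
    set L := low.toList with hL
    set T := t.toList with hT
    by_cases hk1 : k = L.length + 1
    · have hneg : PySem.Chars.findFrom L T (k : Int) none = -1 := by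
        apply pvFindFrom_past; omega
      rw [pvFindLoop, hneg]
      simp [pvCnt, hk1]
    · have hkle : k ≤ L.length := by omega
      by_cases hneg : PySem.Chars.findFrom L T (k : Int) none = -1
      · rw [pvFindLoop]
        rw [pvCnt_zero L T k (pvNoOcc_of_not_infix L T k
          ((PySem.Chars.findFrom_natCast_eq_neg_one_iff L T k hkle).1 hneg))]
        simp [hneg]
      · have hspec := PySem.Chars.findFrom_natCast_spec L T k hkle hneg
        set q : Int := PySem.Chars.findFrom L T (k : Int) none with hq
        have hqle : q ≤ L.length := by
          rw [hq, PySem.Chars.findFrom_natCast L T k hkle]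
          have := PySem.Chars.find_le_length (L.drop k) T
          have hlen : ((L.drop k).length : Int) = (L.length : Int) - k := by
            simp [List.length_drop]; omega
          split_ifs <;> omega
        have hq0 : (0:Int) ≤ q := le_trans (by positivity) hspec.1
        set p : Nat := q.toNat with hp
        have hkp : k ≤ p := by omega
        have hpL : p ≤ L.length := by omega
        rw [pvFindLoop, if_neg hneg]
        have harg : q + 1 = ((p + 1 : Nat) : Int) := by omega
        rw [PySem.Str.findFrom_eq, ← hL, ← hT, harg]
        rw [ih (p + 1) (acc ++ [name]) (by omega) (by omega)]
        rw [pvCnt_succ L T k p hkp hpL hspec.2.1 (fun i h1 h2 => hspec.2.2 i h1 h2)]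
        simp [List.replicate_succ]

theorem pvString_eq_iff (s t : String) : s = t ↔ s.toList = t.toList := by
  constructor
  · intro h; rw [h]
  · intro h; exact String.ext (by simpa [String.ext_iff] using h)

theorem pvFoldlIf {α : Type} (P : α → Prop) [DecidablePred P] (name : String)
    (l : List α) (acc : List String) :
    l.foldl (fun ns x => if P x then ns ++ [name] else ns) acc
      = acc ++ List.replicate ((l.filter (fun x => decide (P x))).length) name := by
  induction l generalizing acc with
  | nil => simp
  | cons x xs ih =>
    simp only [List.foldl_cons]
    by_cases h : P x
    · rw [if_pos h, ih]
      simp [h, List.replicate_succ]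
    · rw [if_neg h, ih]
      simp [h]

theorem pvPrefix_drop_le {L T : List Char} {j : Nat} (h : T <+: L.drop j) :
    T.length + j ≤ L.length ∨ T = [] := by
  rcases Nat.lt_or_ge j L.length with hj | hj
  · left
    have := h.length_le
    simp [List.length_drop] at this
    omega
  · right
    have hlen := h.length_le
    simp [List.length_drop] at hlen
    exact List.eq_nil_of_length_eq_zero (by omega)

-- A's inner loop counts the same occurrence positions
theorem pvInnerA_eq (name low t : String) (names : List String) :
    (PySem.List.pyRange 0 (PySem.Str.len low - PySem.Str.len t + 1) 1).foldl
      (fun ns i =>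
        let s := PySem.Str.slice low (some i) (some (i + PySem.Str.len t))
        if s = t then ns ++ [name] else ns)
      names
    = names ++ List.replicate (pvCnt low.toList t.toList 0) name := by
  set L := low.toList with hL
  set T := t.toList with hT
  rw [pvFoldlIf (fun i : Int => PySem.Str.slice low (some i) (some (i + PySem.Str.len t)) = t) name]
  congr 2
  unfold pvCnt
  by_cases hle : T.length ≤ L.length
  · -- nonempty range of start positions
    have hm : PySem.Str.len low - PySem.Str.len t + 1
        = (((L.length - T.length + 1 : Nat) : Int)) := by
      simp [PySem.Str.len_eq, ← hL, ← hT]; omega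
    rw [hm, PySem.List.pyRange_one]
    set n : Nat := L.length - T.length + 1 with hn
    have htn : ((((n : Nat) : Int)) - 0).toNat = n := by omega
    rw [htn, List.filter_map, List.length_map]
    have hcong : (List.range n).filter
          ((fun i : Int => decide (PySem.Str.slice low (some i) (some (i + PySem.Str.len t)) = t)) ∘ (fun k : Nat => (0 : Int) + k))
        = (List.range n).filter (fun j => decide (T <+: L.drop j)) := by
      apply List.filter_congr
      intro j hj
      simp only [Function.comp_apply, decide_eq_decide]
      rw [pvString_eq_iff, PySem.Str.toList_slice, PySem.Chars.slice_eq_listSlice]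
      have : (0 : Int) + (j : Int) + PySem.Str.len t = ((j : Int)) + ((T.length : Nat) : Int) := by
        simp [PySem.Str.len_eq, ← hT]
      rw [this, show ((0:Int) + (j : Int)) = ((j : Nat) : Int) by omega,
        PySem.List.slice_natCast_add, ← hL, ← hT]
      rw [List.prefix_iff_eq_take]
      constructor
      · intro h; exact h.symm
      · intro h; exact h.symm
    rw [hcong]
    have hsplit : List.range' 0 (L.length + 1 - 0)
        = List.range' 0 n ++ List.range' n T.length := by
      have h1 : List.range' 0 n ++ List.range' (0 + 1 * n) T.length
          = List.range' 0 (n + T.length) := List.range'_append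
      have h2 : 0 + 1 * n = n := by omega
      have h3 : n + T.length = L.length + 1 - 0 := by omega
      rw [h2, h3] at h1
      exact h1.symm
    rw [hsplit, List.filter_append, List.range_eq_range']
    have hnil : (List.range' n T.length).filter (fun j => decide (T <+: L.drop j)) = [] := by
      rw [List.filter_eq_nil_iff.2]
      intro j hj
      have hm := List.mem_range'_1.1 hj
      simp only [decide_eq_true_eq]
      intro hpre
      rcases pvPrefix_drop_le hpre with h | h
      · omega
      · simp [h] at hn; omega
    rw [hnil]
    simp
  · -- target longer than the name: A's range is empty, and no position matches
    have hm : PySem.Str.len low - PySem.Str.len t + 1 ≤ 0 := by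
      simp [PySem.Str.len_eq, ← hL, ← hT]; omega
    rw [PySem.List.pyRange_one_eq_nil (by omega)]
    have hnil : (List.range' 0 (L.length + 1 - 0)).filter (fun j => decide (T <+: L.drop j)) = [] := by
      rw [List.filter_eq_nil_iff.2]
      intro j hj
      simp only [decide_eq_true_eq]
      intro hpre
      rcases pvPrefix_drop_le hpre with h | h
      · omega
      · exact hle (by simp [h])
    rw [hnil]
    simp

-- ===== VERDICT (by name: the statement is the Claim_ definition above) =====
theorem search_names_spec : Claim_equal_search_names := by
  intro name_data target _
  unfold Spec_search_names search_names search_names_alt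
  apply PySem.List.foldl_congr_mem
  intro acc p _
  simp only
  rw [pvInnerA_eq p.1 (PySem.Str.lower p.1) (PySem.Str.lower target) acc]
  rw [show PySem.Str.find (PySem.Str.lower p.1) (PySem.Str.lower target)
      = PySem.Chars.findFrom (PySem.Str.lower p.1).toList (PySem.Str.lower target).toList ((0 : Nat) : Int) none by
    simp [PySem.Str.find_eq, PySem.Chars.findFrom_zero]]
  rw [pvLoop_eq p.1 (PySem.Str.lower p.1) (PySem.Str.lower target)
      ((PySem.Str.lower p.1).toList.length + 2) 0 acc (by omega) (by omega)]
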